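-- pv_equiv track=rewrite | github.com/Sam-Akbari/practice-7 | 12.py | find
-- ===== SOURCE A (Python) =====
-- def find(m, s):
--     """
--     it is for search
--     """
--     smallest = [0] * m#ساخت متغیر
--     remaining_sum = s#ساخت متغیر
--     for i in range(m - 1, -1, -1):#ساخت حلقه
--         digit = min(9, remaining_sum)#عدد کوچکتر
--         smallest[i] = digit#عدد کوچکتر
--         remaining_sum -= digit
--
--     largest = [0] * m
--     remaining_sum = s
--     for i in range(m):#ساخت حلقه
--         digit = min(9, remaining_sum)#ساخت متغیر
--         largest[i] = digit#ساخت متغیر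
--         remaining_sum -= digit
--
--     smallest_num = int("".join(map(str, smallest)))#برای جایگذاری
--     largest_num = int("".join(map(str, largest)))#برای جایگزاری
--
--     return smallest_num, largest_num#برگرداندن عدد
-- ===== SOURCE B (Python) =====
-- def find(m, s):
--     q, r = divmod(s, 9)
--     digits = [9] * min(q, m)
--     if q < m:
--         digits.append(r)
--     digits += [0] * (m - len(digits))
--     largest = int("".join(map(str, digits)))
--     smallest = int("".join(map(str, digits[::-1])))
--     return smallest, largest
-- ===== Notes on version B (the rewrite author's own statement) =====
-- stated objective: simpler
-- what changed: Replaces the two greedy digit-filling loops with a closed-form divmod(s,9) construction (min(q,m) nines, then the remainder, then zero padding) and obtains the smallest number as the reversal of the largest digit list.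
-- outside the precondition, e.g. on find(1, -5): A returns (-5, -5), B returns (4, 4)
import Mathlib
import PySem

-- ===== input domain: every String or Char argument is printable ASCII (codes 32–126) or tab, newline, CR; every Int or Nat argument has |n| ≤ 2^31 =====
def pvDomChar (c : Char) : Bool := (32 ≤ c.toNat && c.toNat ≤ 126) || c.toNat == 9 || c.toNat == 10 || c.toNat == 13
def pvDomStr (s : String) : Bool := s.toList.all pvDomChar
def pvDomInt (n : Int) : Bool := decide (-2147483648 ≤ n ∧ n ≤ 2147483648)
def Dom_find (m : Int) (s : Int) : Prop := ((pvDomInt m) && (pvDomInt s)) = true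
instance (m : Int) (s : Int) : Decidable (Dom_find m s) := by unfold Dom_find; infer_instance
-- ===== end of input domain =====

-- B replaces A's two greedy digit-filling loops with a closed-form divmod(s,9) digit construction
-- plus one reversal (objective: simpler).


-- ===== PORT A =====
-- int("".join(map(str, ds))); the .getD 0 is unreachable under Pre_find (m ≥ 1, digits 0..9).
-- Both Pythons contain this identical expression, so both ports share this helper.
def pyIntOfDigits (ds : List Int) : Int :=
  (PySem.Int.ofChars? ((ds.map PySem.Int.toChars).flatten)).getD 0

-- the (identical) body of A's two loops: digit = min(9, rem); lst[i] = digit; rem -= digit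
def pyStep (p : List Int × Int) (i : Int) : List Int × Int :=
  let digit := min 9 p.2
  (PySem.List.pySetD p.1 i digit, p.2 - digit)

def find (m : Int) (s : Int) : Int × Int :=
  let smallest0 : List Int := List.replicate m.toNat 0   -- [0]*m ([] for m ≤ 0, as in Python)
  let sm := (PySem.List.pyRange (m-1) (-1) (-1)).foldl pyStep (smallest0, s)
  let largest0 : List Int := List.replicate m.toNat 0
  let lg := (PySem.List.pyRange 0 m 1).foldl pyStep (largest0, s)
  (pyIntOfDigits sm.1, pyIntOfDigits lg.1)

-- ===== PORT B =====
def find_alt (m : Int) (s : Int) : Int × Int :=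
  let q := PySem.Int.floordiv s 9
  let r := PySem.Int.mod s 9
  let d1 : List Int := List.replicate (min q m).toNat 9          -- [9]*min(q,m) ([] if negative)
  let d2 : List Int := if q < m then d1 ++ [r] else d1
  let digits := d2 ++ List.replicate (m - PySem.List.len d2).toNat 0
  -- digits[::-1] is digits.reverse (PySem.List.slice?_none_none_neg_one)
  (pyIntOfDigits digits.reverse, pyIntOfDigits digits)

-- ===== PRECONDITION & SPEC =====
-- Pre_ restricts to the natural domain m ≥ 1, s ≥ 0: A raises ValueError (int("")) for m ≤ 0,
-- and for s < 0 A raises ValueError whenever m ≥ 2; the remaining sliver m = 1, s < 0 (where A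
-- returns (s, s), a negative "digit") is outside the digit-sum domain and excluded with it.
def Pre_find (m : Int) (s : Int) : Prop := 1 ≤ m ∧ 0 ≤ s
instance (m : Int) (s : Int) : Decidable (Pre_find m s) := by unfold Pre_find; infer_instance
def pvWitness_find : Int × Int := (3, 20)
def Spec_find (m : Int) (s : Int) (out : Int × Int) : Prop := out = find_alt m s
instance (m : Int) (s : Int) (out : Int × Int) : Decidable (Spec_find m s out) := by unfold Spec_find; infer_instance

-- ===== CLAIM (what is proved, stated in full; the proofs are below) =====
def Claim_equal_find : Prop := ∀ (m : Int) (s : Int), Dom_find m s → Pre_find m s → Spec_find m s (find m s)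

-- ===== LEMMAS AND PROOFS =====

-- the greedy digit sequence A's loops generate, with the remaining sum
def G : Nat → Int → List Int × Int
  | 0, rem => ([], rem)
  | n+1, rem =>
      let d := min 9 rem
      let p := G n (rem - d)
      (d :: p.1, p.2)

-- A's largest loop, as an invariant over a prefix already written
theorem foldl_largest (n : Nat) : ∀ (pre post : List Int) (rem : Int), post.length = n →
    (PySem.List.pyRange (pre.length : Int) ((pre.length : Int) + n) 1).foldl pyStep (pre ++ post, rem)
      = (pre ++ (G n rem).1, (G n rem).2) := by
  induction n with
  | zero =>
      intro pre post rem h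
      rw [List.length_eq_zero_iff.mp h, PySem.List.pyRange_one_eq_nil (by omega)]
      simp [G]
  | succ k ih =>
      intro pre post rem h
      cases post with
      | nil => simp at h
      | cons x t =>
        rw [PySem.List.pyRange_one_cons (by omega)]
        simp only [List.foldl_cons]
        have hstep : pyStep (pre ++ x :: t, rem) (pre.length : Int)
            = (pre ++ min 9 rem :: t, rem - min 9 rem) := by
          simp [pyStep]
        rw [hstep]
        have h1 : (pre ++ min 9 rem :: t) = (pre ++ [min 9 rem]) ++ t := by simp
        have h2 : ((pre.length : Int) + 1) = (((pre ++ [min 9 rem]).length : Int)) := by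
          simp only [List.length_append, List.length_cons, List.length_nil]; push_cast; ring
        have h3 : ((pre.length : Int) + (k+1 : Nat)) = (((pre ++ [min 9 rem]).length : Int) + k) := by
          simp only [List.length_append, List.length_cons, List.length_nil]; push_cast; ring
        rw [h1, h2, h3, ih (pre ++ [min 9 rem]) t (rem - min 9 rem) (by simpa using h)]
        simp [G]

-- A's smallest loop writes the same greedy digits right-to-left: result = reverse
theorem foldl_smallest (n : Nat) : ∀ (pre post : List Int) (rem : Int), pre.length = n →
    (PySem.List.pyRange ((n : Int) - 1) (-1) (-1)).foldl pyStep (pre ++ post, rem)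
      = ((G n rem).1.reverse ++ post, (G n rem).2) := by
  induction n with
  | zero =>
      intro pre post rem h
      rw [List.length_eq_zero_iff.mp h, PySem.List.pyRange_neg_one_eq_nil (by omega)]
      simp [G]
  | succ k ih =>
      intro pre post rem h
      rcases List.eq_nil_or_concat pre with rfl | ⟨p', x, rfl⟩
      · simp at h
      · simp only [List.concat_eq_append] at h ⊢
        have hp : p'.length = k := by simpa using h
        rw [PySem.List.pyRange_neg_one_cons (by omega)]
        simp only [List.foldl_cons]
        have hidx : ((k+1 : Nat) : Int) - 1 = (p'.length : Int) := by omega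
        have hstep : pyStep ((p' ++ [x]) ++ post, rem) (((k+1 : Nat) : Int) - 1)
            = (p' ++ min 9 rem :: post, rem - min 9 rem) := by
          rw [hidx]
          simp only [pyStep, List.append_assoc, List.cons_append, List.nil_append]
          simp
        rw [hstep]
        have h4 : ((k+1 : Nat) : Int) - 1 - 1 = (k : Int) - 1 := by push_cast; omega
        rw [h4, ih p' (min 9 rem :: post) (rem - min 9 rem) hp]
        simp [G]

theorem G_zero_sum (n : Nat) : (G n 0).1 = List.replicate n 0 ∧ (G n 0).2 = 0 := by
  induction n with
  | zero => simp [G]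
  | succ k ih => simpa [G, List.replicate_succ] using ih

-- the greedy digit list equals B's closed-form digit list
theorem G_eq_alt (n : Nat) : ∀ (s : Int), 0 ≤ s →
    (G n s).1 =
      (let q := PySem.Int.floordiv s 9
       let d2 := if q < (n : Int) then List.replicate (min q (n : Int)).toNat 9 ++ [PySem.Int.mod s 9]
                 else List.replicate (min q (n : Int)).toNat 9
       d2 ++ List.replicate (((n : Int)) - PySem.List.len d2).toNat 0) := by
  induction n with
  | zero =>
      intro s hs
      have hq : 0 ≤ PySem.Int.floordiv s 9 := by
        rw [PySem.Int.floordiv_eq_ediv_of_pos (by omega)]; omega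
      simp only [G, Nat.cast_zero]
      rw [if_neg (by omega)]
      have : (min (PySem.Int.floordiv s 9) 0).toNat = 0 := by omega
      simp [this]
  | succ k ih =>
      intro s hs
      have h9 : (0:Int) < 9 := by norm_num
      by_cases hlt : s < 9
      · -- q = 0: single digit s then zeros
        have hq : PySem.Int.floordiv s 9 = 0 := by
          rw [PySem.Int.floordiv_eq_ediv_of_pos h9]; omega
        have hr : PySem.Int.mod s 9 = s := by
          rw [PySem.Int.mod_eq_emod_of_pos h9]; omega
        have hmin : min 9 s = s := by omega
        simp only [G, hmin, sub_self]
        rw [(G_zero_sum k).1]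
        simp only [hq, hr]
        push_cast
        rw [if_pos (show (0:Int) < (k:Int) + 1 by positivity)]
        have hm0 : (min (0:Int) ((k:Int)+1)).toNat = 0 := by omega
        rw [hm0]
        simp only [List.replicate_zero, List.nil_append, PySem.List.len_eq,
          List.length_cons, List.length_nil, List.singleton_append]
        have : ((k:Int) + 1 - ((1:Nat):Int)).toNat = k := by omega
        rw [this]
      · -- s ≥ 9: head digit 9, tail is the case (k, s-9)
        have hmin : min 9 s = 9 := by omega
        have hq9 : PySem.Int.floordiv s 9 = PySem.Int.floordiv (s-9) 9 + 1 := by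
          rw [PySem.Int.floordiv_eq_ediv_of_pos h9, PySem.Int.floordiv_eq_ediv_of_pos h9]; omega
        have hr9 : PySem.Int.mod s 9 = PySem.Int.mod (s-9) 9 := by
          rw [PySem.Int.mod_eq_emod_of_pos h9, PySem.Int.mod_eq_emod_of_pos h9]; omega
        have hq'0 : 0 ≤ PySem.Int.floordiv (s-9) 9 := by
          rw [PySem.Int.floordiv_eq_ediv_of_pos h9]; omega
        simp only [G, hmin]
        rw [ih (s - 9) (by omega)]
        simp only [hq9, hr9]
        set q' := PySem.Int.floordiv (s-9) 9 with hq'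
        push_cast
        have hminsucc : (min (q' + 1) ((k:Int)+1)).toNat = (min q' (k:Int)).toNat + 1 := by
          omega
        rw [hminsucc]
        by_cases hc : q' < (k:Int)
        · rw [if_pos hc, if_pos (show q' + 1 < (k:Int) + 1 by omega)]
          simp only [List.replicate_succ, PySem.List.len_eq, List.length_append,
            List.length_cons, List.length_nil, List.length_replicate, List.cons_append,
            List.append_assoc, List.singleton_append]
          congr 3
          simp only [List.nil_append]
          congr 1
          omega
        · rw [if_neg hc, if_neg (show ¬ (q' + 1 < (k:Int) + 1) by omega)]
          simp only [List.replicate_succ, PySem.List.len_eq, List.length_append,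
            List.length_cons, List.length_nil, List.length_replicate, List.cons_append,
            List.append_assoc, List.singleton_append]
          congr 3
          congr 1
          omega

-- ===== VERDICT (by name: the statement is the Claim_ definition above) =====
theorem find_spec : Claim_equal_find := by
  intro m s _ hpre
  obtain ⟨hm, hs⟩ := hpre
  unfold Spec_find find find_alt
  set n := m.toNat with hn
  have hmn : m = (n : Int) := by omega
  -- largest loop: rewrite range bounds to the invariant's shape
  have hL : (PySem.List.pyRange 0 m 1).foldl pyStep (List.replicate n (0:Int), s)
      = ((G n s).1, (G n s).2) := by
    have := foldl_largest n [] (List.replicate n 0) s (by simp)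
    simpa [hmn] using this
  have hS : (PySem.List.pyRange (m-1) (-1) (-1)).foldl pyStep (List.replicate n (0:Int), s)
      = ((G n s).1.reverse, (G n s).2) := by
    have := foldl_smallest n (List.replicate n 0) [] s (by simp)
    simpa [hmn] using this
  simp only [hL, hS]
  rw [G_eq_alt n s hs]
  simp only [hmn]
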